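-- pv_equiv track=rewrite | github.com/S-P-F-Base/spf-base-site | scripts/normalize_wiki.py | rebuild_meta
-- ===== SOURCE A (Python) =====
-- from typing import List, Tuple
--
-- META_ORDER = ["Title", "Author", "Date", "Background"]
--
-- def normalize_keys_capitalization(key: str) -> str:
--     lower = key.lower()
--     for wanted in META_ORDER:
--         if wanted.lower() == lower:
--             return wanted
--
--     return key[:1].upper() + key[1:]
--
-- def rebuild_meta(items: List[Tuple[str, str]]) -> str:
--     last_map: dict[str, Tuple[str, str]] = {}
--     for k, v in items:
--         last_map[k.lower()] = (k, v)
--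
--     out: List[Tuple[str, str]] = []
--     for wanted in META_ORDER:
--         pair = last_map.pop(wanted.lower(), None)
--         if pair:
--             out.append((wanted, pair[1]))
--
--     for _, (k, v) in sorted(last_map.items(), key=lambda kv: kv[0]):
--         out.append((normalize_keys_capitalization(k), v))
--
--     if not out:
--         return ""
--
--     return "\n".join(f"{k}: {v}".rstrip() for k, v in out) + "\n\n"
-- ===== SOURCE B (Python) =====
-- from typing import List, Tuple
--
-- META_ORDER = ["Title", "Author", "Date", "Background"]
--
-- def normalize_keys_capitalization(key: str) -> str:
--     lower = key.lower()
--     for wanted in META_ORDER: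
--         if wanted.lower() == lower:
--             return wanted
--
--     return key[:1].upper() + key[1:]
--
-- def rebuild_meta(items: List[Tuple[str, str]]) -> str:
--     last_map: dict[str, Tuple[str, str]] = {}
--     for k, v in items:
--         last_map[k.lower()] = (k, v)
--
--     rank = {m.lower(): i for i, m in enumerate(META_ORDER)}
--     n = len(META_ORDER)
--     ordered = sorted(last_map.items(), key=lambda kv: (rank.get(kv[0], n), kv[0]))
--
--     lines = [f"{normalize_keys_capitalization(k)}: {v}".rstrip() for _, (k, v) in ordered]
--     if not lines:
--         return ""
--     return "\n".join(lines) + "\n\n"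
-- ===== Notes on version B (the rewrite author's own statement) =====
-- stated objective: alternative
-- what changed: A emits META_ORDER keys by a fixed-order pop loop and then separately sorts the leftover keys; B sorts all deduplicated entries once with a composite key (meta-rank, lowercase key) and emits every entry uniformly through normalize_keys_capitalization.
import Mathlib
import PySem

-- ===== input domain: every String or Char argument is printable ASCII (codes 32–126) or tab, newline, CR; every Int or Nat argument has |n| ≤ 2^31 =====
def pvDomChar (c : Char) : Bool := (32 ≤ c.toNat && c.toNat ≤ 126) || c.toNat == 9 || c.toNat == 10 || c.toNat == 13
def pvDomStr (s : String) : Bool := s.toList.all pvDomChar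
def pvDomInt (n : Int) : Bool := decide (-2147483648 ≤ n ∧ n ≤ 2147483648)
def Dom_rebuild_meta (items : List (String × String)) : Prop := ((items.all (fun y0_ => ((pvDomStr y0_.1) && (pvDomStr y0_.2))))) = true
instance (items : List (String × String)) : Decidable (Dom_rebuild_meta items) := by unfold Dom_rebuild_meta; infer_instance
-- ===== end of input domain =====

-- B replaces A's fixed-order meta emission + separate sort of the leftovers by ONE composite-key sort
-- of all deduplicated items (objective: alternative decomposition, same cost).

-- module constant shared by both Pythons
def META_ORDER : List String := ["Title", "Author", "Date", "Background"]

-- module helper shared by both Pythons (early-return for-loop = structural recursion)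
def nkcFind (lower : String) : List String → Option String
  | [] => none
  | wanted :: rest =>
    if PySem.Str.lower wanted == lower then some wanted else nkcFind lower rest

def normalize_keys_capitalization (key : String) : String :=
  match nkcFind (PySem.Str.lower key) META_ORDER with
  | some wanted => wanted
  | none => PySem.Str.upper (PySem.Str.slice key none (some 1)) ++ PySem.Str.slice key (some 1) none

-- ===== PORT A =====
def rebuild_meta (items : List (String × String)) : String :=
  let last_map : PySem.Dict String (String × String) :=
    items.foldl (fun d kv => d.insert (PySem.Str.lower kv.1) (kv.1, kv.2)) PySem.Dict.empty
  let st :=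
    META_ORDER.foldl
      (fun (st : PySem.Dict String (String × String) × List (String × String)) wanted =>
        match st.1.pop? (PySem.Str.lower wanted) with
        | some pr => (pr.2, st.2 ++ [(wanted, pr.1.2)])
        | none => st)
      (last_map, [])
  let out := st.2 ++ (PySem.List.sorted st.1.items (fun kv => kv.1)).map
      (fun kv => (normalize_keys_capitalization kv.2.1, kv.2.2))
  if out = [] then ""
  else PySem.Str.join "\n" (out.map (fun kv => PySem.Str.rstrip (kv.1 ++ ": " ++ kv.2))) ++ "\n\n"

-- ===== PORT B =====
def rebuild_meta_alt (items : List (String × String)) : String :=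
  let last_map : PySem.Dict String (String × String) :=
    items.foldl (fun d kv => d.insert (PySem.Str.lower kv.1) (kv.1, kv.2)) PySem.Dict.empty
  let rank : PySem.Dict String Int :=
    (PySem.List.enumerate META_ORDER).foldl
      (fun d p => d.insert (PySem.Str.lower p.2) p.1) PySem.Dict.empty
  let n : Int := PySem.List.len META_ORDER
  let ordered := PySem.List.sorted2 last_map.items (fun kv => rank.getD kv.1 n) (fun kv => kv.1)
  let lines := ordered.map (fun kv =>
    PySem.Str.rstrip (normalize_keys_capitalization kv.2.1 ++ ": " ++ kv.2.2))
  if lines = [] then "" else PySem.Str.join "\n" lines ++ "\n\n"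

-- ===== PRECONDITION & SPEC =====
def Spec_rebuild_meta (items : List (String × String)) (out : String) : Prop := out = rebuild_meta_alt items
instance (items : List (String × String)) (out : String) : Decidable (Spec_rebuild_meta items out) := by unfold Spec_rebuild_meta; infer_instance

-- ===== CLAIM (what is proved, stated in full; the proofs are below) =====
def Claim_equal_rebuild_meta : Prop := ∀ (items : List (String × String)), Dom_rebuild_meta items → Spec_rebuild_meta items (rebuild_meta items)

-- ===== LEMMAS AND PROOFS =====

-- the deduplicating dict both programs build first
def pvDict (items : List (String × String)) : PySem.Dict String (String × String) :=
  items.foldl (fun d kv => d.insert (PySem.Str.lower kv.1) (kv.1, kv.2)) PySem.Dict.empty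

def lmeta : List String := ["title", "author", "date", "background"]

-- the concrete rank dict B builds, as a plain function
def rankD (k : String) : Int :=
  (PySem.Dict.mk [("title", (0:Int)), ("author", 1), ("date", 2), ("background", 3)]).getD k 4

-- composite sort key used by B
def pvKey (kv : String × (String × String)) : Lex (Int × String) := toLex (rankD kv.1, kv.1)

-- A's pop loop over a list of wanted names, as two structural functions
def eraseLow (d : PySem.Dict String (String × String)) (ms : List String) :
    PySem.Dict String (String × String) :=
  ms.foldl (fun d m => d.erase m) d

def popOut (d : PySem.Dict String (String × String)) : List String → List (String × String)
  | [] => []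
  | w :: ws =>
    (match d.get? (PySem.Str.lower w) with
      | some p => [(w, p.2)]
      | none => []) ++ popOut (d.erase (PySem.Str.lower w)) ws

-- the meta entries selected out of d, keyed by lowered name
def metaSelL (d : PySem.Dict String (String × String)) (ms : List String) :
    List (String × (String × String)) :=
  ms.filterMap (fun m => (d.get? m).map (fun p => (m, p)))

lemma erase_get?_of_ne (d : PySem.Dict String (String × String)) (k k' : String)
    (h : k' ≠ k) : (d.erase k).get? k' = d.get? k' := by
  obtain ⟨l⟩ := d
  induction l with
  | nil => rfl
  | cons q l ih =>
    obtain ⟨a, v⟩ := q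
    by_cases hp : a = k
    · subst hp
      have he : (PySem.Dict.mk ((a, v) :: l) : PySem.Dict String (String × String)).erase a
          = (PySem.Dict.mk l : PySem.Dict String (String × String)).erase a := by
        simp [PySem.Dict.erase]
      rw [he, ih, PySem.Dict.get?_mk_cons]
      have hb : (a == k') = false := by simp [Ne.symm h]
      simp [hb]
    · have he : (PySem.Dict.mk ((a, v) :: l) : PySem.Dict String (String × String)).erase k
          = PySem.Dict.mk ((a, v) ::
              ((PySem.Dict.mk l : PySem.Dict String (String × String)).erase k).items) := by
        simp [PySem.Dict.erase, hp]
      rw [he, PySem.Dict.get?_mk_cons, PySem.Dict.get?_mk_cons]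
      have hmk : (PySem.Dict.mk
            (((PySem.Dict.mk l : PySem.Dict String (String × String)).erase k).items)
            : PySem.Dict String (String × String))
          = (PySem.Dict.mk l : PySem.Dict String (String × String)).erase k := rfl
      rw [hmk, ih]

lemma erase_of_not_contains (d : PySem.Dict String (String × String)) (k : String)
    (h : d.get? k = none) : d.erase k = d := by
  apply PySem.Dict.ext
  show d.items.filter (fun p => !p.1 == k) = d.items
  rw [List.filter_eq_self]
  intro p hp
  have hc := (PySem.Dict.get?_eq_none_iff_contains d k).1 h
  have hk : k ∉ d.keys := fun hm => by
    have ht := (PySem.Dict.contains_iff_mem_keys d k).2 hm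
    rw [hc] at ht
    cases ht
  have hpk : p.1 ∈ d.keys := PySem.Dict.mem_keys_of_mem_items d hp
  by_cases e : p.1 = k
  · exact absurd (e ▸ hpk) hk
  · simp [e]

lemma pvDict_nodup (items : List (String × String)) : (pvDict items).keys.Nodup :=
  PySem.Dict.nodup_keys_foldl_insert_key items (fun kv => PySem.Str.lower kv.1)
    (fun _ kv => (kv.1, kv.2)) PySem.Dict.empty PySem.Dict.nodup_keys_empty

lemma pvDict_inv_aux (l : List (String × String)) (d : PySem.Dict String (String × String))
    (h : ∀ p ∈ d.items, PySem.Str.lower p.2.1 = p.1) :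
    ∀ p ∈ (l.foldl (fun d kv => d.insert (PySem.Str.lower kv.1) (kv.1, kv.2)) d).items,
      PySem.Str.lower p.2.1 = p.1 := by
  induction l generalizing d with
  | nil => exact h
  | cons kv l ih =>
    rw [List.foldl_cons]
    apply ih
    intro p hp
    rcases (PySem.Dict.mem_items_insert _ _ _ _).1 hp with h1 | h1
    · rw [h1]
    · exact h p h1.1

lemma pvDict_inv (items : List (String × String)) :
    ∀ p ∈ (pvDict items).items, PySem.Str.lower p.2.1 = p.1 :=
  pvDict_inv_aux items PySem.Dict.empty (by intro p hp; simp [PySem.Dict.empty] at hp)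

lemma pop_foldl_eq (ws : List String) (d : PySem.Dict String (String × String))
    (acc : List (String × String)) :
    ws.foldl
      (fun (st : PySem.Dict String (String × String) × List (String × String)) wanted =>
        match st.1.pop? (PySem.Str.lower wanted) with
        | some pr => (pr.2, st.2 ++ [(wanted, pr.1.2)])
        | none => st)
      (d, acc)
    = (eraseLow d (ws.map PySem.Str.lower), acc ++ popOut d ws) := by
  induction ws generalizing d acc with
  | nil => simp [eraseLow, popOut]
  | cons w ws ih =>
    rw [List.foldl_cons]
    cases h : d.get? (PySem.Str.lower w) with
    | none =>
      have hstep : (match d.pop? (PySem.Str.lower w) with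
          | some pr => (pr.2, acc ++ [(w, pr.1.2)])
          | none => (d, acc)) = (d, acc) := by
        rw [PySem.Dict.pop?, h]; rfl
      rw [hstep, ih]
      rw [popOut, h]
      simp [eraseLow, erase_of_not_contains d _ h]
    | some p =>
      have hstep : (match d.pop? (PySem.Str.lower w) with
          | some pr => (pr.2, acc ++ [(w, pr.1.2)])
          | none => (d, acc))
          = (d.erase (PySem.Str.lower w), acc ++ [(w, p.2)]) := by
        simp [PySem.Dict.pop?, h]
      rw [hstep, ih]
      rw [popOut, h]
      simp [eraseLow]

lemma popOut_filterMap (ws : List String) (d : PySem.Dict String (String × String))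
    (hnd : (ws.map PySem.Str.lower).Nodup) :
    popOut d ws
      = ws.filterMap (fun w => (d.get? (PySem.Str.lower w)).map (fun p => (w, p.2))) := by
  induction ws generalizing d with
  | nil => rfl
  | cons w ws ih =>
    rw [List.map_cons, List.nodup_cons] at hnd
    rw [popOut, List.filterMap_cons]
    rw [ih (d.erase (PySem.Str.lower w)) hnd.2]
    have hcg : ∀ w' ∈ ws,
        ((d.erase (PySem.Str.lower w)).get? (PySem.Str.lower w')).map (fun p => (w', p.2))
          = (d.get? (PySem.Str.lower w')).map (fun p => (w', p.2)) := by
      intro w' hw'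
      rw [erase_get?_of_ne]
      intro e
      exact hnd.1 (e ▸ List.mem_map_of_mem hw')
    rw [List.filterMap_congr hcg]
    cases d.get? (PySem.Str.lower w) <;> simp

lemma items_eraseLow (ms : List String) (d : PySem.Dict String (String × String)) :
    (eraseLow d ms).items = d.items.filter (fun p => decide (p.1 ∉ ms)) := by
  induction ms generalizing d with
  | nil => simp [eraseLow]
  | cons m ms ih =>
    have h1 : eraseLow d (m :: ms) = eraseLow (d.erase m) ms := by simp [eraseLow]
    rw [h1, ih]
    show ((PySem.Dict.mk (d.items.filter (fun p => !p.1 == m)) :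
        PySem.Dict String (String × String)).items).filter _ = _
    show (d.items.filter (fun p => !p.1 == m)).filter (fun p => decide (p.1 ∉ ms)) = _
    rw [List.filter_filter]
    apply List.filter_congr
    intro p _
    by_cases e : p.1 = m
    · simp [e, List.mem_cons]
    · simp [e, List.mem_cons, Bool.and_comm]

lemma mem_metaSelL (d : PySem.Dict String (String × String)) (ms : List String)
    (x : String × (String × String)) :
    x ∈ metaSelL d ms ↔ x.1 ∈ ms ∧ d.get? x.1 = some x.2 := by
  unfold metaSelL
  rw [List.mem_filterMap]
  constructor
  · rintro ⟨m, hm, hf⟩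
    rcases Option.map_eq_some_iff.1 hf with ⟨p, hp, he⟩
    rw [← he]
    exact ⟨hm, hp⟩
  · rintro ⟨h1, h2⟩
    exact ⟨x.1, h1, by rw [h2]; rfl⟩

lemma nodup_metaSelL (d : PySem.Dict String (String × String)) (ms : List String)
    (hms : ms.Nodup) : (metaSelL d ms).Nodup := by
  induction ms with
  | nil => simp [metaSelL]
  | cons m ms ih =>
    rw [List.nodup_cons] at hms
    unfold metaSelL
    rw [List.filterMap_cons]
    cases h : d.get? m with
    | none => simpa using ih hms.2
    | some p =>
      simp only [Option.map_some]
      rw [List.nodup_cons]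
      refine ⟨fun hmem => ?_, ih hms.2⟩
      exact hms.1 ((mem_metaSelL d ms _).1 hmem).1
    
lemma sorted2_eq_sorted_toLex {α : Type} (xs : List α) (k1 : α → Int) (k2 : α → String) :
    PySem.List.sorted2 xs k1 k2 = PySem.List.sorted xs (fun x => toLex (k1 x, k2 x)) := by
  unfold PySem.List.sorted2
  rw [PySem.List.sorted_eq_foldl_insertBy]
  simp only [Bool.false_eq_true, if_false]
  congr 1
  funext acc x
  congr 1
  funext a b
  simp only [Prod.Lex.toLex_lt_toLex]
  rcases lt_trichotomy (k1 a) (k1 b) with h | h | h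
  · simp [h]
  · simp [h]
  · simp [h, lt_asymm h, h.ne']

lemma rankD_of_not_mem (k : String) (h : k ∉ lmeta) : rankD k = 4 := by
  simp only [lmeta, List.mem_cons, not_or, List.not_mem_nil] at h
  unfold rankD
  rw [PySem.Dict.getD_eq_get?_getD]
  rw [PySem.Dict.get?_mk_cons, PySem.Dict.get?_mk_cons, PySem.Dict.get?_mk_cons,
      PySem.Dict.get?_mk_cons]
  have h1 : (("title" : String) == k) = false := by simp [Ne.symm h.1]
  have h2 : (("author" : String) == k) = false := by simp [Ne.symm h.2.1]
  have h3 : (("date" : String) == k) = false := by simp [Ne.symm h.2.2.1]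
  have h4 : (("background" : String) == k) = false := by simp [Ne.symm h.2.2.2.1]
  simp [h1, h2, h3, h4, PySem.Dict.get?]

lemma rankD_lt_of_mem (m : String) (h : m ∈ lmeta) : rankD m < 4 := by
  fin_cases h <;> decide

lemma ordered_eq (d : PySem.Dict String (String × String)) (hnd : d.keys.Nodup) :
    PySem.List.sorted d.items pvKey
      = metaSelL d lmeta
        ++ PySem.List.sorted ((eraseLow d lmeta).items) (fun kv => kv.1) := by
  have hkeys : d.keys = d.items.map (fun p => p.1) := rfl
  have hitems_nodup : d.items.Nodup := List.Nodup.of_map _ (hkeys ▸ hnd)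
  have hrest_items : (eraseLow d lmeta).items = d.items.filter (fun p => decide (p.1 ∉ lmeta)) :=
    items_eraseLow lmeta d
  have hrest_mem : ∀ b ∈ PySem.List.sorted ((eraseLow d lmeta).items) (fun kv => kv.1),
      b.1 ∉ lmeta := by
    intro b hb
    have := (PySem.List.mem_sorted _ _ _ _).1 hb
    rw [hrest_items] at this
    simpa using (List.mem_filter.1 this).2
  apply PySem.List.sorted_eq_of_perm_of_pairwise_lt
  · -- permutation
    have h1 : (metaSelL d lmeta).Perm (d.items.filter (fun p => decide (p.1 ∈ lmeta))) := by
      rw [List.perm_ext_iff_of_nodup (nodup_metaSelL d lmeta (by decide))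
          (hitems_nodup.filter _)]
      intro x
      rw [mem_metaSelL, List.mem_filter]
      constructor
      · rintro ⟨h1, h2⟩
        refine ⟨?_, by simpa using h1⟩
        have := (PySem.Dict.get?_eq_some_iff_mem_items d x.1 x.2 hnd).1 h2
        simpa using this
      · rintro ⟨h1, h2⟩
        refine ⟨by simpa using h2, ?_⟩
        rw [PySem.Dict.get?_eq_some_iff_mem_items d x.1 x.2 hnd]
        simpa using h1
    have h2 : (PySem.List.sorted ((eraseLow d lmeta).items) (fun kv => kv.1)).Perm
        (d.items.filter (fun p => !decide (p.1 ∈ lmeta))) := by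
      refine (PySem.List.sorted_perm _ _ _).trans ?_
      rw [hrest_items]
      apply List.Perm.of_eq
      apply List.filter_congr
      intro p _
      simp [decide_not]
    exact (h1.append h2).trans (List.filter_append_perm _ _)
  · -- pairwise strictly increasing composite key
    rw [List.pairwise_append]
    refine ⟨?_, ?_, ?_⟩
    · unfold metaSelL
      rw [List.pairwise_filterMap]
      have hbase : lmeta.Pairwise
          (fun m m' => (toLex (rankD m, m) : Lex (Int × String)) < toLex (rankD m', m')) := by
        decide
      refine hbase.imp_of_mem ?_
      intro m m' _ _ hlt b hb b' hb'
      rcases Option.map_eq_some_iff.1 hb with ⟨p, _, he⟩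
      rcases Option.map_eq_some_iff.1 hb' with ⟨p', _, he'⟩
      rw [← he, ← he']
      exact hlt
    · have hle := PySem.List.sorted_pairwise ((eraseLow d lmeta).items) (fun kv => kv.1)
      have hperm := PySem.List.sorted_perm ((eraseLow d lmeta).items) (fun kv => kv.1) false
      have hnd2 : ((eraseLow d lmeta).items.map (fun p => p.1)).Nodup := by
        rw [hrest_items]
        have hsub : ((d.items.filter (fun p => decide (p.1 ∉ lmeta))).map
            (fun p : String × (String × String) => p.1)).Sublist
            (d.items.map (fun p => p.1)) :=
          List.Sublist.map _ List.filter_sublist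
        exact List.Nodup.sublist hsub (hkeys ▸ hnd)
      have hnd3 : ((PySem.List.sorted ((eraseLow d lmeta).items) (fun kv => kv.1)).map
          (fun p => p.1)).Nodup := ((hperm.map _).nodup_iff).2 hnd2
      have hne : (PySem.List.sorted ((eraseLow d lmeta).items) (fun kv => kv.1)).Pairwise
          (fun a b => a.1 ≠ b.1) := List.pairwise_map.1 hnd3
      refine ((hle.and hne).imp_of_mem ?_)
      intro a b ha hb hab
      have ha4 : rankD a.1 = 4 := rankD_of_not_mem _ (hrest_mem a ha)
      have hb4 : rankD b.1 = 4 := rankD_of_not_mem _ (hrest_mem b hb)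
      show pvKey a < pvKey b
      unfold pvKey
      rw [Prod.Lex.toLex_lt_toLex]
      exact Or.inr ⟨by rw [ha4, hb4], lt_of_le_of_ne hab.1 hab.2⟩
    · intro a ha b hb
      have ha' : a.1 ∈ lmeta := ((mem_metaSelL d lmeta a).1 ha).1
      have hb4 : rankD b.1 = 4 := rankD_of_not_mem _ (hrest_mem b hb)
      show pvKey a < pvKey b
      unfold pvKey
      rw [Prod.Lex.toLex_lt_toLex]
      exact Or.inl (by rw [hb4]; exact rankD_lt_of_mem _ ha')

lemma normalize_of_lower_mem (w : String) (hw : w ∈ META_ORDER) (k : String)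
    (h : PySem.Str.lower k = PySem.Str.lower w) :
    normalize_keys_capitalization k = w := by
  fin_cases hw
  · have h' : PySem.Str.lower k = "title" := by rw [h]; decide
    unfold normalize_keys_capitalization; rw [h']; rfl
  · have h' : PySem.Str.lower k = "author" := by rw [h]; decide
    unfold normalize_keys_capitalization; rw [h']; rfl
  · have h' : PySem.Str.lower k = "date" := by rw [h]; decide
    unfold normalize_keys_capitalization; rw [h']; rfl
  · have h' : PySem.Str.lower k = "background" := by rw [h]; decide
    unfold normalize_keys_capitalization; rw [h']; rfl

lemma map_lower_META : META_ORDER.map PySem.Str.lower = lmeta := by decide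

-- the whole computation after the shared dict, over an arbitrary dict
lemma final_aux (d : PySem.Dict String (String × String)) (hnd : d.keys.Nodup)
    (hinv : ∀ p ∈ d.items, PySem.Str.lower p.2.1 = p.1) :
    (let st :=
      META_ORDER.foldl
        (fun (st : PySem.Dict String (String × String) × List (String × String)) wanted =>
          match st.1.pop? (PySem.Str.lower wanted) with
          | some pr => (pr.2, st.2 ++ [(wanted, pr.1.2)])
          | none => st)
        (d, []);
     let out := st.2 ++ (PySem.List.sorted st.1.items (fun kv => kv.1)).map
        (fun kv => (normalize_keys_capitalization kv.2.1, kv.2.2));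
     if out = [] then ""
     else PySem.Str.join "\n" (out.map (fun kv => PySem.Str.rstrip (kv.1 ++ ": " ++ kv.2))) ++ "\n\n")
    =
    (let rank : PySem.Dict String Int :=
      (PySem.List.enumerate META_ORDER).foldl
        (fun d p => d.insert (PySem.Str.lower p.2) p.1) PySem.Dict.empty;
     let n : Int := PySem.List.len META_ORDER;
     let ordered := PySem.List.sorted2 d.items (fun kv => rank.getD kv.1 n) (fun kv => kv.1);
     let lines := ordered.map (fun kv =>
        PySem.Str.rstrip (normalize_keys_capitalization kv.2.1 ++ ": " ++ kv.2.2));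
     if lines = [] then "" else PySem.Str.join "\n" lines ++ "\n\n") := by
  have hrank : ((PySem.List.enumerate META_ORDER).foldl
      (fun d p => d.insert (PySem.Str.lower p.2) p.1) PySem.Dict.empty : PySem.Dict String Int)
      = PySem.Dict.mk [("title", 0), ("author", 1), ("date", 2), ("background", 3)] := by decide
  simp only [hrank]
  have hkeyfn : (fun kv : String × (String × String) =>
      toLex (((PySem.Dict.mk [("title", (0:Int)), ("author", 1), ("date", 2),
        ("background", 3)]).getD kv.1 (PySem.List.len META_ORDER)), kv.1)) = pvKey := by
    funext kv; rfl
  rw [pop_foldl_eq, map_lower_META, sorted2_eq_sorted_toLex, hkeyfn, ordered_eq d hnd]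
  set rest := PySem.List.sorted ((eraseLow d lmeta).items) (fun kv => kv.1) with hrest
  -- the two emitted line lists coincide
  have hmeta : (popOut d META_ORDER).map
        (fun kv => PySem.Str.rstrip (kv.1 ++ ": " ++ kv.2))
      = (metaSelL d lmeta).map (fun kv =>
        PySem.Str.rstrip (normalize_keys_capitalization kv.2.1 ++ ": " ++ kv.2.2)) := by
    rw [popOut_filterMap META_ORDER d (by decide)]
    unfold metaSelL
    rw [← map_lower_META, List.filterMap_map]
    rw [List.map_filterMap, List.map_filterMap]
    apply List.filterMap_congr
    intro w hw
    simp only [Function.comp_apply]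
    cases h : d.get? (PySem.Str.lower w) with
    | none => rfl
    | some p =>
      simp only [Option.map_some]
      have hmem := (PySem.Dict.get?_eq_some_iff_mem_items d (PySem.Str.lower w) p hnd).1 h
      have hlow : PySem.Str.lower p.1 = PySem.Str.lower w := hinv _ hmem
      rw [normalize_of_lower_mem w hw p.1 hlow]
  dsimp only
  simp only [List.nil_append]
  have hlines : ((popOut d META_ORDER) ++ rest.map
        (fun kv => (normalize_keys_capitalization kv.2.1, kv.2.2))).map
        (fun kv => PySem.Str.rstrip (kv.1 ++ ": " ++ kv.2))
      = ((metaSelL d lmeta) ++ rest).map (fun kv =>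
        PySem.Str.rstrip (normalize_keys_capitalization kv.2.1 ++ ": " ++ kv.2.2)) := by
    rw [List.map_append, List.map_append, hmeta, List.map_map]
    rfl
  by_cases he : (popOut d META_ORDER) ++ rest.map
      (fun kv => (normalize_keys_capitalization kv.2.1, kv.2.2)) = []
  · rw [if_pos he, if_pos (by rw [← hlines, he]; rfl)]
  · rw [if_neg he, if_neg (fun hc => he (List.map_eq_nil_iff.1 (hlines.trans hc))), hlines]

-- ===== VERDICT (by name: the statement is the Claim_ definition above) =====
theorem rebuild_meta_spec : Claim_equal_rebuild_meta := by
  intro items _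
  show rebuild_meta items = rebuild_meta_alt items
  exact final_aux (pvDict items) (pvDict_nodup items) (pvDict_inv items)
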